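-- pv_equiv track=rewrite | github.com/An-d-u/ENE | src/ai/note_service.py | _normalize_args_for_cli
-- ===== SOURCE A (Python) =====
-- def _normalize_args_for_cli(args: list[str]) -> list[str]:
--     if not args:
--         return []
--     head = str(args[0]).lower()
--     raw_rest = list(args[1:])
--     named_map: dict[str, str] = {}
--     named_tokens: list[str] = []
--     positional: list[str] = []
--
--     for token in raw_rest:
--         token_str = str(token)
--         if "=" in token_str and not token_str.startswith("="):
--             key, _ = token_str.split("=", 1)
--             key_low = key.strip().lower()
--             if key_low and key_low not in named_map:
--                 named_map[key_low] = token_str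
--                 named_tokens.append(token_str)
--                 continue
--         positional.append(token_str)
--
--     def pop_positional() -> str:
--         if not positional:
--             return ""
--         return positional.pop(0)
--
--     def ensure_named(key: str, value: str):
--         key_low = key.lower()
--         if key_low in named_map:
--             return
--         if value == "":
--             return
--         token = f"{key}={value}"
--         named_map[key_low] = token
--         named_tokens.append(token)
--
--     if head in {"create", "file", "folder", "open", "read", "delete", "backlinks", "links", "aliases", "properties", "task", "history", "diff"}:
--         ensure_named("path", pop_positional())
--     elif head == "tab:open":
--         ensure_named("file", pop_positional())
--     elif head in {"append", "prepend"}: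
--         ensure_named("path", pop_positional())
--         ensure_named("content", pop_positional())
--     elif head in {"daily:append", "daily:prepend"}:
--         ensure_named("content", pop_positional())
--     elif head == "move":
--         ensure_named("path", pop_positional())
--         ensure_named("to", pop_positional())
--     elif head == "rename":
--         ensure_named("path", pop_positional())
--         ensure_named("name", pop_positional())
--     elif head in {"search", "search:context", "search:open"}:
--         ensure_named("query", pop_positional())
--     elif head == "property:set":
--         ensure_named("path", pop_positional())
--         ensure_named("name", pop_positional())
--         ensure_named("value", pop_positional())
--     elif head in {"property:read", "property:remove"}:
--         ensure_named("path", pop_positional())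
--         ensure_named("name", pop_positional())
--     elif head == "template:insert":
--         ensure_named("name", pop_positional())
--
--     return [str(args[0]), *named_tokens, *positional]
-- ===== SOURCE B (Python) =====
-- _SCHEMAS = {
--     **dict.fromkeys(
--         ("create", "file", "folder", "open", "read", "delete", "backlinks",
--          "links", "aliases", "properties", "task", "history", "diff"),
--         ("path",)),
--     "tab:open": ("file",),
--     "append": ("path", "content"),
--     "prepend": ("path", "content"),
--     "daily:append": ("content",),
--     "daily:prepend": ("content",),
--     "move": ("path", "to"),
--     "rename": ("path", "name"),
--     "search": ("query",),
--     "search:context": ("query",),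
--     "search:open": ("query",),
--     "property:set": ("path", "name", "value"),
--     "property:read": ("path", "name"),
--     "property:remove": ("path", "name"),
--     "template:insert": ("name",),
-- }
--
--
-- def _normalize_args_for_cli(args: list[str]) -> list[str]:
--     if not args:
--         return []
--     named: list[str] = []
--     seen: set[str] = set()
--     positional: list[str] = []
--     for token in args[1:]:
--         token = str(token)
--         if "=" in token and not token.startswith("="):
--             key = token.split("=", 1)[0].strip().lower()
--             if key and key not in seen:
--                 seen.add(key)
--                 named.append(token)
--                 continue
--         positional.append(token)
--     i = 0
--     for key in _SCHEMAS.get(str(args[0]).lower(), ()):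
--         value = positional[i] if i < len(positional) else ""
--         i += 1
--         if key not in seen and value:
--             seen.add(key)
--             named.append(f"{key}={value}")
--     return [str(args[0]), *named, *positional[i:]]
-- ===== Notes on version B (the rewrite author's own statement) =====
-- stated objective: simpler
-- what changed: Replaced A's ten-branch if/elif cascade of ensure_named(pop_positional()) calls with a static schema dictionary (command head -> ordered field names) consumed by one table-driven loop that walks the positional list by index, and replaced the named_map dict with a plain set of seen keys.
import Mathlib
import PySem

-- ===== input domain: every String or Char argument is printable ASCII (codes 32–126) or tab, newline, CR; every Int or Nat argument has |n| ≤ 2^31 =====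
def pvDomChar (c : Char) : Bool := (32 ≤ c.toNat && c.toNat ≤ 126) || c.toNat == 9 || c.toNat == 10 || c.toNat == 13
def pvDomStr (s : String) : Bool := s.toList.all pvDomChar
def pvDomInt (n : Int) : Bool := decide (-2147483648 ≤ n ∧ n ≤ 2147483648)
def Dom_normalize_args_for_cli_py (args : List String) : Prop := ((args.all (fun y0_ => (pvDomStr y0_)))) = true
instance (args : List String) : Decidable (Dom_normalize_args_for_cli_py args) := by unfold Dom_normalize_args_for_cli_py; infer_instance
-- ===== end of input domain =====

-- B replaces A's ten-branch if/elif dispatch by a static schema dictionary (command head -> ordered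
-- field names) consumed by one table-driven loop with an index into the positional list, and tracks
-- seen keys with a set instead of a dict; objective: simpler.

-- ===== PORT A =====
-- token-classification loop body of A
def aClassify (st : PySem.Dict String String × List String × List String) (token : String) :
    PySem.Dict String String × List String × List String :=
  let ts := token
  if PySem.Str.isIn "=" ts && !(PySem.Str.startswith ts "=") then
    let key := ((PySem.Str.splitMax? ts "=" 1).getD []).headD ""
    let keyLow := PySem.Str.lower (PySem.Str.strip key)
    if keyLow != "" && !(st.1.contains keyLow) then
      (st.1.insert keyLow ts, st.2.1 ++ [ts], st.2.2)
    else
      (st.1, st.2.1, st.2.2 ++ [ts])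
  else
    (st.1, st.2.1, st.2.2 ++ [ts])

-- pop_positional
def aPop (pos : List String) : String × List String :=
  match pos with
  | [] => ("", [])
  | x :: xs => (x, xs)

-- ensure_named
def aEnsure (key value : String) (st : PySem.Dict String String × List String) :
    PySem.Dict String String × List String :=
  let keyLow := PySem.Str.lower key
  if st.1.contains keyLow then st
  else if value = "" then st
  else (st.1.insert keyLow (key ++ "=" ++ value), st.2 ++ [key ++ "=" ++ value])

-- ensure_named(key, pop_positional())
def aOne (key : String) (st : PySem.Dict String String × List String × List String) :
    PySem.Dict String String × List String × List String :=
  let pv := aPop st.2.2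
  let en := aEnsure key pv.1 (st.1, st.2.1)
  (en.1, en.2, pv.2)

-- A's if/elif dispatch over the command head
def aDispatch (head : String) (st : PySem.Dict String String × List String × List String) :
    PySem.Dict String String × List String × List String :=
  if head ∈ ["create", "file", "folder", "open", "read", "delete", "backlinks", "links",
             "aliases", "properties", "task", "history", "diff"] then
    aOne "path" st
  else if head = "tab:open" then
    aOne "file" st
  else if head ∈ ["append", "prepend"] then
    aOne "content" (aOne "path" st)
  else if head ∈ ["daily:append", "daily:prepend"] then
    aOne "content" st
  else if head = "move" then
    aOne "to" (aOne "path" st)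
  else if head = "rename" then
    aOne "name" (aOne "path" st)
  else if head ∈ ["search", "search:context", "search:open"] then
    aOne "query" st
  else if head = "property:set" then
    aOne "value" (aOne "name" (aOne "path" st))
  else if head ∈ ["property:read", "property:remove"] then
    aOne "name" (aOne "path" st)
  else if head = "template:insert" then
    aOne "name" st
  else st

def normalize_args_for_cli_py (args : List String) : List String :=
  match args with
  | [] => []
  | a0 :: rest =>
    let head := PySem.Str.lower a0
    let st := rest.foldl aClassify (PySem.Dict.empty, [], [])
    let fin := aDispatch head st
    a0 :: (fin.2.1 ++ fin.2.2)

-- ===== PORT B =====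
-- the static schema table _SCHEMAS of Source B (dict.fromkeys group expanded in order)
def bSchemas : PySem.Dict String (List String) :=
  PySem.Dict.ofList
    [("create", ["path"]), ("file", ["path"]), ("folder", ["path"]), ("open", ["path"]),
     ("read", ["path"]), ("delete", ["path"]), ("backlinks", ["path"]), ("links", ["path"]),
     ("aliases", ["path"]), ("properties", ["path"]), ("task", ["path"]), ("history", ["path"]),
     ("diff", ["path"]),
     ("tab:open", ["file"]),
     ("append", ["path", "content"]), ("prepend", ["path", "content"]),
     ("daily:append", ["content"]), ("daily:prepend", ["content"]),
     ("move", ["path", "to"]), ("rename", ["path", "name"]),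
     ("search", ["query"]), ("search:context", ["query"]), ("search:open", ["query"]),
     ("property:set", ["path", "name", "value"]),
     ("property:read", ["path", "name"]), ("property:remove", ["path", "name"]),
     ("template:insert", ["name"])]

-- B's token-classification loop body (seen keys kept in a set)
def bClassify (st : List String × PySem.Set String × List String) (token : String) :
    List String × PySem.Set String × List String :=
  if PySem.Str.isIn "=" token && !(PySem.Str.startswith token "=") then
    let key := PySem.Str.lower (PySem.Str.strip
      (((PySem.Str.splitMax? token "=" 1).getD []).headD ""))
    if key != "" && !(PySem.Set.contains st.2.1 key) then
      (st.1 ++ [token], PySem.Set.add st.2.1 key, st.2.2)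
    else
      (st.1, st.2.1, st.2.2 ++ [token])
  else
    (st.1, st.2.1, st.2.2 ++ [token])

-- B's table-driven loop body: one schema key consumes one positional slot by index
def bStep (pos : List String) (st : List String × PySem.Set String × Nat) (key : String) :
    List String × PySem.Set String × Nat :=
  let value := pos.getD st.2.2 ""
  let i' := st.2.2 + 1
  if !(PySem.Set.contains st.2.1 key) && value != "" then
    (st.1 ++ [key ++ "=" ++ value], PySem.Set.add st.2.1 key, i')
  else
    (st.1, st.2.1, i')

def normalize_args_for_cli_py_alt (args : List String) : List String :=
  match args with
  | [] => []
  | a0 :: rest =>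
    let c := rest.foldl bClassify ([], PySem.Set.empty, [])
    let fin := (bSchemas.getD (PySem.Str.lower a0) []).foldl (bStep c.2.2) (c.1, c.2.1, 0)
    a0 :: (fin.1 ++ c.2.2.drop fin.2.2)

-- ===== PRECONDITION & SPEC =====
def Spec_normalize_args_for_cli_py (args : List String) (out : List String) : Prop := out = normalize_args_for_cli_py_alt args
instance (args : List String) (out : List String) : Decidable (Spec_normalize_args_for_cli_py args out) := by unfold Spec_normalize_args_for_cli_py; infer_instance

-- ===== CLAIM (what is proved, stated in full; the proofs are below) =====
def Claim_equal_normalize_args_for_cli_py : Prop := ∀ (args : List String), Dom_normalize_args_for_cli_py args → Spec_normalize_args_for_cli_py args (normalize_args_for_cli_py args)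

-- ===== LEMMAS AND PROOFS =====

-- A's dispatch as a fold over the key list (proof-side view of the nested aOne applications)
def aRun (ks : List String) (st : PySem.Dict String String × List String × List String) :
    PySem.Dict String String × List String × List String :=
  ks.foldl (fun s k => aOne k s) st

-- the key list each branch of A's chain applies
def keysFor (head : String) : List String :=
  if head ∈ ["create", "file", "folder", "open", "read", "delete", "backlinks", "links",
             "aliases", "properties", "task", "history", "diff"] then ["path"]
  else if head = "tab:open" then ["file"]
  else if head ∈ ["append", "prepend"] then ["path", "content"]
  else if head ∈ ["daily:append", "daily:prepend"] then ["content"]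
  else if head = "move" then ["path", "to"]
  else if head = "rename" then ["path", "name"]
  else if head ∈ ["search", "search:context", "search:open"] then ["query"]
  else if head = "property:set" then ["path", "name", "value"]
  else if head ∈ ["property:read", "property:remove"] then ["path", "name"]
  else if head = "template:insert" then ["name"]
  else []

set_option maxHeartbeats 1000000 in
lemma aDispatch_eq_aRun (head : String)
    (st : PySem.Dict String String × List String × List String) :
    aDispatch head st = aRun (keysFor head) st := by
  unfold aDispatch keysFor
  split_ifs <;> rfl

lemma keysFor_lower (head k : String) (hk : k ∈ keysFor head) : PySem.Str.lower k = k := by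
  unfold keysFor at hk
  split_ifs at hk <;> simp only [List.mem_cons, List.not_mem_nil] at hk <;>
    rcases hk with rfl | hk <;> first | rfl | (rcases hk with rfl | hk <;>
      first | rfl | (rcases hk with rfl | hk <;> first | rfl | exact absurd hk (by simp)))

lemma bSchemas_mk : bSchemas = PySem.Dict.mk
    [("create", ["path"]), ("file", ["path"]), ("folder", ["path"]), ("open", ["path"]),
     ("read", ["path"]), ("delete", ["path"]), ("backlinks", ["path"]), ("links", ["path"]),
     ("aliases", ["path"]), ("properties", ["path"]), ("task", ["path"]), ("history", ["path"]),
     ("diff", ["path"]),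
     ("tab:open", ["file"]),
     ("append", ["path", "content"]), ("prepend", ["path", "content"]),
     ("daily:append", ["content"]), ("daily:prepend", ["content"]),
     ("move", ["path", "to"]), ("rename", ["path", "name"]),
     ("search", ["query"]), ("search:context", ["query"]), ("search:open", ["query"]),
     ("property:set", ["path", "name", "value"]),
     ("property:read", ["path", "name"]), ("property:remove", ["path", "name"]),
     ("template:insert", ["name"])] := by rfl

lemma get?_mk_nil (k : String) :
    (PySem.Dict.mk ([] : List (String × List String))).get? k = none := rfl

lemma getD_keysFor (head : String) : bSchemas.getD head [] = keysFor head := by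
  rw [bSchemas_mk]
  unfold keysFor
  split_ifs with h1 h2 h3 h4 h5 h6 h7 h8 h9 h10
  · simp only [List.mem_cons, List.not_mem_nil, or_false] at h1
    rcases h1 with rfl|rfl|rfl|rfl|rfl|rfl|rfl|rfl|rfl|rfl|rfl|rfl|rfl <;> rfl
  · subst h2; rfl
  · simp only [List.mem_cons, List.not_mem_nil, or_false] at h3
    rcases h3 with rfl|rfl <;> rfl
  · simp only [List.mem_cons, List.not_mem_nil, or_false] at h4
    rcases h4 with rfl|rfl <;> rfl
  · subst h5; rfl
  · subst h6; rfl
  · simp only [List.mem_cons, List.not_mem_nil, or_false] at h7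
    rcases h7 with rfl|rfl|rfl <;> rfl
  · subst h8; rfl
  · simp only [List.mem_cons, List.not_mem_nil, or_false] at h9
    rcases h9 with rfl|rfl <;> rfl
  · subst h10; rfl
  · simp only [List.mem_cons, List.not_mem_nil, or_false, not_or] at *
    obtain ⟨a1,a2,a3,a4,a5,a6,a7,a8,a9,a10,a11,a12,a13⟩ := h1
    obtain ⟨b1,b2⟩ := h3
    obtain ⟨c1,c2⟩ := h4
    obtain ⟨d1,d2,d3⟩ := h7
    obtain ⟨e1,e2⟩ := h9
    simp [PySem.Dict.getD_eq_get?_getD, PySem.Dict.get?_mk_cons, get?_mk_nil,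
      Ne.symm a1, Ne.symm a2, Ne.symm a3, Ne.symm a4, Ne.symm a5, Ne.symm a6, Ne.symm a7,
      Ne.symm a8, Ne.symm a9, Ne.symm a10, Ne.symm a11, Ne.symm a12, Ne.symm a13,
      Ne.symm h2, Ne.symm b1, Ne.symm b2, Ne.symm c1, Ne.symm c2, Ne.symm h5, Ne.symm h6,
      Ne.symm d1, Ne.symm d2, Ne.symm d3, Ne.symm h8, Ne.symm e1, Ne.symm e2, Ne.symm h10]

lemma contains_eq_set_contains (d : PySem.Dict String String) (seen : PySem.Set String)
    (h : d.keys = seen) (k : String) : d.contains k = PySem.Set.contains seen k := by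
  rw [Bool.eq_iff_iff, PySem.Dict.contains_iff_mem_keys, PySem.Set.contains_iff, h]

lemma classify_rel (rest : List String) :
    ∀ (d : PySem.Dict String String) (named pos : List String) (seen : PySem.Set String),
    d.keys = seen →
    (rest.foldl aClassify (d, named, pos)).2.1 = (rest.foldl bClassify (named, seen, pos)).1 ∧
    (rest.foldl aClassify (d, named, pos)).2.2 = (rest.foldl bClassify (named, seen, pos)).2.2 ∧
    (rest.foldl aClassify (d, named, pos)).1.keys = (rest.foldl bClassify (named, seen, pos)).2.1 := by
  induction rest with
  | nil => intro d named pos seen h; exact ⟨rfl, rfl, h⟩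
  | cons t ts ih =>
    intro d named pos seen h
    simp only [List.foldl_cons]
    by_cases hc : (PySem.Str.isIn "=" t && !(PySem.Str.startswith t "=")) = true
    · set key := PySem.Str.lower (PySem.Str.strip
        (((PySem.Str.splitMax? t "=" 1).getD []).headD "")) with hkey
      have hcnt := contains_eq_set_contains d seen h key
      by_cases hg : (key != "" && !(PySem.Set.contains seen key)) = true
      · have hns : PySem.Set.contains seen key = false := by
          rcases Bool.and_eq_true .. |>.mp hg with ⟨_, hn⟩
          simpa using hn
        have hstep : aClassify (d, named, pos) t =
            (d.insert key t, named ++ [t], pos) := by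
          simp only [aClassify, hc, if_true, ← hkey]
          rw [if_pos (by rw [hcnt]; exact hg)]
        have hstepb : bClassify (named, seen, pos) t =
            (named ++ [t], PySem.Set.add seen key, pos) := by
          simp only [bClassify, hc, if_true, ← hkey]
          rw [if_pos hg]
        rw [hstep, hstepb]
        apply ih
        have hnm : key ∉ seen := fun hm => by
          rw [(PySem.Set.contains_iff seen key).mpr hm] at hns; exact Bool.noConfusion hns
        rw [PySem.Dict.keys_insert_of_not_contains _ _ (by rw [hcnt]; exact hns), h]
        simp [PySem.Set.add, hnm]
      · have hstep : aClassify (d, named, pos) t = (d, named, pos ++ [t]) := by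
          simp only [aClassify, hc, if_true, ← hkey]
          rw [if_neg (by rw [hcnt]; exact hg)]
        have hstepb : bClassify (named, seen, pos) t = (named, seen, pos ++ [t]) := by
          simp only [bClassify, hc, if_true, ← hkey]
          rw [if_neg hg]
        rw [hstep, hstepb]
        exact ih d named (pos ++ [t]) seen h
    · have hstep : aClassify (d, named, pos) t = (d, named, pos ++ [t]) := by
        simp only [aClassify]
        rw [if_neg hc]
      have hstepb : bClassify (named, seen, pos) t = (named, seen, pos ++ [t]) := by
        simp only [bClassify]
        rw [if_neg hc]
      rw [hstep, hstepb]
      exact ih d named (pos ++ [t]) seen h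

lemma aPop_drop (pos : List String) (i : Nat) :
    aPop (pos.drop i) = (pos.getD i "", pos.drop (i + 1)) := by
  rcases hd : pos.drop i with _ | ⟨x, xs⟩
  · have hlen : pos.length ≤ i := List.drop_eq_nil_iff.mp hd
    have h2 : pos.drop (i + 1) = [] := List.drop_eq_nil_iff.mpr (by omega)
    rw [h2, List.getD_eq_default _ _ hlen]; rfl
  · have hx : pos[i]? = some x := by
      rw [← List.head?_drop, hd]; rfl
    have hxs : pos.drop (i + 1) = xs := by
      rw [← List.tail_drop, hd]; rfl
    rw [hxs, List.getD_eq_getElem?_getD, hx]; rfl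

lemma run_rel (ks : List String) :
    ∀ (d : PySem.Dict String String) (named pos : List String) (seen : PySem.Set String)
      (i : Nat),
    d.keys = seen → (∀ k ∈ ks, PySem.Str.lower k = k) →
    (aRun ks (d, named, pos.drop i)).2.1 = (ks.foldl (bStep pos) (named, seen, i)).1 ∧
    (aRun ks (d, named, pos.drop i)).2.2 = pos.drop (ks.foldl (bStep pos) (named, seen, i)).2.2 ∧
    (aRun ks (d, named, pos.drop i)).1.keys = (ks.foldl (bStep pos) (named, seen, i)).2.1 := by
  induction ks with
  | nil => intro d named pos seen i h _; exact ⟨rfl, rfl, h⟩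
  | cons k ks ih =>
    intro d named pos seen i h hlow
    have hlk : PySem.Str.lower k = k := hlow k (by simp)
    have hcnt := contains_eq_set_contains d seen h k
    have hpop := aPop_drop pos i
    simp only [aRun, List.foldl_cons]
    set v := pos.getD i "" with hv
    have haOne : aOne k (d, named, pos.drop i) =
        ((aEnsure k v (d, named)).1, (aEnsure k v (d, named)).2, pos.drop (i + 1)) := by
      simp only [aOne, hpop]
    by_cases hseen : PySem.Set.contains seen k = true
    · have hens : aEnsure k v (d, named) = (d, named) := by
        simp only [aEnsure, hlk]
        rw [if_pos (by rw [hcnt]; exact hseen)]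
      have hb : bStep pos (named, seen, i) k = (named, seen, i + 1) := by
        simp only [bStep, hseen, Bool.not_true, Bool.false_and]
        rfl
      rw [haOne, hens, hb]
      exact ih d named pos seen (i + 1) h (fun x hx => hlow x (by simp [hx]))
    · have hseen' : PySem.Set.contains seen k = false := by
        cases hx : PySem.Set.contains seen k
        · rfl
        · exact absurd hx hseen
      by_cases hvz : v = ""
      · have hens : aEnsure k v (d, named) = (d, named) := by
          simp only [aEnsure, hlk]
          rw [if_neg (by rw [hcnt, hseen']; simp), if_pos hvz]
        have hb : bStep pos (named, seen, i) k = (named, seen, i + 1) := by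
          simp only [bStep, hseen', Bool.not_false, Bool.true_and, ← hv, hvz]
          rfl
        rw [haOne, hens, hb]
        exact ih d named pos seen (i + 1) h (fun x hx => hlow x (by simp [hx]))
      · have hens : aEnsure k v (d, named) =
            (d.insert k (k ++ "=" ++ v), named ++ [k ++ "=" ++ v]) := by
          simp only [aEnsure, hlk]
          rw [if_neg (by rw [hcnt, hseen']; simp), if_neg hvz]
        have hvt : (v != "") = true := bne_iff_ne.mpr hvz
        have hb : bStep pos (named, seen, i) k =
            (named ++ [k ++ "=" ++ v], PySem.Set.add seen k, i + 1) := by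
          simp only [bStep, hseen', Bool.not_false, Bool.true_and, ← hv, hvt, if_true]
        rw [haOne, hens, hb]
        apply ih _ _ _ _ _ _ (fun x hx => hlow x (by simp [hx]))
        have hnm : k ∉ seen := fun hm => by
          rw [(PySem.Set.contains_iff seen k).mpr hm] at hseen'; exact Bool.noConfusion hseen'
        rw [PySem.Dict.keys_insert_of_not_contains _ _ (by rw [hcnt]; exact hseen'), h]
        simp [PySem.Set.add, hnm]

-- ===== VERDICT (by name: the statement is the Claim_ definition above) =====
theorem normalize_args_for_cli_py_spec : Claim_equal_normalize_args_for_cli_py := by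
  intro args _
  unfold Spec_normalize_args_for_cli_py
  cases args with
  | nil => rfl
  | cons a0 rest =>
    simp only [normalize_args_for_cli_py, normalize_args_for_cli_py_alt]
    obtain ⟨h1, h2, h3⟩ := classify_rel rest PySem.Dict.empty [] [] PySem.Set.empty
      (by simp [PySem.Set.empty])
    set cA := rest.foldl aClassify (PySem.Dict.empty, [], []) with hcA
    set cB := rest.foldl bClassify ([], PySem.Set.empty, []) with hcB
    rw [getD_keysFor, aDispatch_eq_aRun]
    have hst : cA = (cA.1, cA.2.1, cA.2.2) := rfl
    rw [hst, h1, h2]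
    have hdrop : cB.2.2 = cB.2.2.drop 0 := rfl
    rw [hdrop]
    obtain ⟨g1, g2, g3⟩ := run_rel (keysFor (PySem.Str.lower a0)) cA.1 cB.1 cB.2.2 cB.2.1 0
      (by rw [h3]) (fun k hk => keysFor_lower _ k hk)
    rw [List.drop_zero] at g1 g2 ⊢
    rw [g1, g2]
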